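-- pv_equiv track=rewrite | github.com/volcengine/verl | atropos/environments/intern_bootcamp/internbootcamp_lib/internbootcamp/bootcamp/canimpassionedcirculationofaffection/canimpassionedcirculationofaffection.py | compute_max_koyomity
-- ===== SOURCE A (Python) =====
-- def compute_max_koyomity(s, c, m):
--     def sliding_window(s_seq):
--         max_len = left = changes = 0
--         for right in range(len(s_seq)):
--             if s_seq[right] != c:
--                 changes += 1
--             while changes > m:
--                 if s_seq[left] != c:
--                     changes -= 1
--                 left += 1
--             max_len = max(max_len, right - left + 1)
--         return max_len
--
--     # 添加预处理优化
--     if m >= len(s) - s.count(c):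
--         return len(s)
--
--     return max(sliding_window(s), sliding_window(s[::-1]))
-- ===== SOURCE B (Python) =====
-- def compute_max_koyomity(s, c, m):
--     n = len(s)
--     pre = [0] * (n + 1)
--     for i, ch in enumerate(s):
--         pre[i + 1] = pre[i] + (ch != c)
--
--     def can(L):
--         return any(pre[i + L] - pre[i] <= m for i in range(n - L + 1))
--
--     lo, hi, ans = 0, n, 0
--     while lo <= hi:
--         mid = (lo + hi) // 2
--         if can(mid):
--             ans = mid
--             lo = mid + 1
--         else:
--             hi = mid - 1
--     return ans
-- ===== Notes on version B (the rewrite author's own statement) =====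
-- stated objective: alternative
-- what changed: Replaces the two sliding-window passes (forward and over the reversed string) by a prefix-sum mismatch array plus binary search on the answer length with a linear feasibility scan.
-- intended difference: When c is not a single character (empty or multi-char) and m is at least len(s) minus the SUBSTRING count s.count(c) but less than len(s), A's shortcut accidentally returns len(s) although len(s) single-character changes would be needed; B returns m, the true maximal window with at most m changed positions, which is the intended value. — e.g. on compute_max_koyomity("ab", "", 1): A returns 2, B returns 1
-- outside the precondition, e.g. on compute_max_koyomity('ab', '', -1): A returns 2, B returns 0
import Mathlib
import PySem

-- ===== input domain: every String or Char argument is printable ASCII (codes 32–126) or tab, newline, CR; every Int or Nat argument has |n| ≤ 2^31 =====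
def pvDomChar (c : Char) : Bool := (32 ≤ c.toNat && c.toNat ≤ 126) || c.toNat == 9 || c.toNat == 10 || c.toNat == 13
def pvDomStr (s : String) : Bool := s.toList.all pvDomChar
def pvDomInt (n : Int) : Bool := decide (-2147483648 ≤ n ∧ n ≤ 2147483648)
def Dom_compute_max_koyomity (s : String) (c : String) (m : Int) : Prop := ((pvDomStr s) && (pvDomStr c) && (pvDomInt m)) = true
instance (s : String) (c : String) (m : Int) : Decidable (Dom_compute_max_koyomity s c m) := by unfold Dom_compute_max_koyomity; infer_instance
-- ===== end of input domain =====

-- B replaces A's two sliding-window passes by a prefix-sum mismatch array plus binary search on the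
-- answer length (objective: alternative algorithm, similar cost).

-- ===== PORT A =====
-- inner 'while changes > m' loop of sliding_window; fuel bounds the iterations (the loop moves left
-- one step per iteration); 'none' from the index lookup is where Python raises IndexError (outside Pre_).
def pvAWhile (l : List Char) (c : String) (m : Int) : Nat → Nat → Int → Nat × Int
  | 0, left, changes => (left, changes)
  | fuel+1, left, changes =>
    if changes > m then
      match l[left]? with
      | none => (left, changes)   -- Python raises IndexError here; excluded by Pre_
      | some ch =>
        pvAWhile l c m fuel (left + 1) (if c.toList = [ch] then changes else changes - 1)
    else (left, changes)

-- sliding_window: fold over range(len(s_seq)) carrying (max_len, left, changes);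
-- s_seq[right] != c is the comparison of the one-char string [ch] with c.
def pvASlide (l : List Char) (c : String) (m : Int) : Int :=
  ((List.range l.length).foldl (fun st right =>
      let changes := if c.toList = [l.getD right ' '] then st.2.2 else st.2.2 + 1
      let w := pvAWhile l c m (l.length + 1) st.2.1 changes
      (max st.1 ((right : Int) - (w.1 : Int) + 1), w.1, w.2))
    (0, 0, 0)).1

def compute_max_koyomity (s : String) (c : String) (m : Int) : Int :=
  if (s.toList.length : Int) - (PySem.Str.count s c : Int) ≤ m then (s.toList.length : Int)
  else max (pvASlide s.toList c m) (pvASlide s.toList.reverse c m)   -- s[::-1] is reverse (PySem.Str.slice?_none_none_neg_one)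

-- ===== PORT B =====
-- pre[i+1] = pre[i] + (ch != c), built by the loop over s as structural recursion on the list.
def pvBPre (c : String) : List Char → Int → List Int
  | [], _ => []
  | ch :: t, cur =>
    let cur' := cur + (if c.toList = [ch] then 0 else 1)
    cur' :: pvBPre c t cur'

-- can(L): any(pre[i+L] - pre[i] <= m for i in range(n - L + 1))
def pvBCan (pre : List Int) (n : Nat) (m : Int) (L : Int) : Bool :=
  (PySem.List.pyRange 0 ((n : Int) - L + 1) 1).any
    (fun i => pre.getD (i + L).toNat 0 - pre.getD i.toNat 0 ≤ m)

-- while lo <= hi: binary search for the largest feasible L; fuel bounds the iterations.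
def pvBSearch (pre : List Int) (n : Nat) (m : Int) : Nat → Int → Int → Int → Int
  | 0, _, _, ans => ans
  | fuel+1, lo, hi, ans =>
    if lo ≤ hi then
      let mid := PySem.Int.floordiv (lo + hi) 2
      if pvBCan pre n m mid then pvBSearch pre n m fuel (mid + 1) hi mid
      else pvBSearch pre n m fuel lo (mid - 1) ans
    else ans

def compute_max_koyomity_alt (s : String) (c : String) (m : Int) : Int :=
  pvBSearch (0 :: pvBPre c s.toList 0) s.toList.length m (s.toList.length + 2) 0 (s.toList.length : Int) 0

-- ===== PRECONDITION & SPEC =====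
-- Pre_ excludes negative m on a non-empty s: there A's inner while loop either raises IndexError
-- or, when the substring-count shortcut fires, returns an accidental value
-- (e.g. ("ab", "", -1): A returns 2, B returns 0).
def Pre_compute_max_koyomity (s : String) (_c : String) (m : Int) : Prop := 0 ≤ m ∨ s = ""
instance (s : String) (c : String) (m : Int) : Decidable (Pre_compute_max_koyomity s c m) := by
  unfold Pre_compute_max_koyomity; infer_instance
def pvWitness_compute_max_koyomity : String × String × Int := ("ab", "a", 1)

-- When c is not a single character and len(s) - s.count(c) <= m < len(s), A's shortcut accidentally
-- returns len(s) (it counts SUBSTRING occurrences of c) although len(s) single-character changes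
-- would be needed; B returns m, the true maximal window with at most m changed positions.
def D_compute_max_koyomity (s : String) (c : String) (m : Int) : Prop :=
  PySem.Str.len c ≠ 1 ∧ 0 ≤ m ∧
  (PySem.Str.len s : Int) ≤ m + (PySem.Str.count s c : Int) ∧ m < (PySem.Str.len s : Int)
instance (s : String) (c : String) (m : Int) : Decidable (D_compute_max_koyomity s c m) := by
  unfold D_compute_max_koyomity; infer_instance

def Spec_compute_max_koyomity (s : String) (c : String) (m : Int) (out : Int) : Prop :=
  ¬ D_compute_max_koyomity s c m → out = compute_max_koyomity_alt s c m
instance (s : String) (c : String) (m : Int) (out : Int) : Decidable (Spec_compute_max_koyomity s c m out) := by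
  unfold Spec_compute_max_koyomity; infer_instance

def pvDiffWitness_compute_max_koyomity : String × String × Int := ("ab", "", 1)
def pvDiffWitnessOut_compute_max_koyomity : Int × Int := (2, 1)

-- ===== CLAIM (what is proved, stated in full; the proofs are below) =====
def Claim_unchanged_compute_max_koyomity : Prop := ∀ (s : String) (c : String) (m : Int), Dom_compute_max_koyomity s c m → Pre_compute_max_koyomity s c m → Spec_compute_max_koyomity s c m (compute_max_koyomity s c m)
def Claim_changed_compute_max_koyomity : Prop := Dom_compute_max_koyomity (pvDiffWitness_compute_max_koyomity.1) (pvDiffWitness_compute_max_koyomity.2.1) (pvDiffWitness_compute_max_koyomity.2.2) ∧ Pre_compute_max_koyomity (pvDiffWitness_compute_max_koyomity.1) (pvDiffWitness_compute_max_koyomity.2.1) (pvDiffWitness_compute_max_koyomity.2.2) ∧ D_compute_max_koyomity (pvDiffWitness_compute_max_koyomity.1) (pvDiffWitness_compute_max_koyomity.2.1) (pvDiffWitness_compute_max_koyomity.2.2) ∧ compute_max_koyomity (pvDiffWitness_compute_max_koyomity.1) (pvDiffWitness_compute_max_koyomity.2.1) (pvDiffWitness_compute_max_koyomity.2.2) =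 pvDiffWitnessOut_compute_max_koyomity.1 ∧ compute_max_koyomity_alt (pvDiffWitness_compute_max_koyomity.1) (pvDiffWitness_compute_max_koyomity.2.1) (pvDiffWitness_compute_max_koyomity.2.2) = pvDiffWitnessOut_compute_max_koyomity.2 ∧ pvDiffWitnessOut_compute_max_koyomity.1 ≠ pvDiffWitnessOut_compute_max_koyomity.2
def Claim_exact_compute_max_koyomity : Prop := ∀ (s : String) (c : String) (m : Int), Dom_compute_max_koyomity s c m → Pre_compute_max_koyomity s c m → D_compute_max_koyomity s c m → compute_max_koyomity s c m ≠ compute_max_koyomity_alt s c m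

-- ===== LEMMAS AND PROOFS =====

def pvP (c : String) (l : List Char) (j : Nat) : Nat :=
  (l.take j).countP (fun ch => !decide (c.toList = [ch]))

lemma pvP_mono (c : String) (l : List Char) {i j : Nat} (h : i ≤ j) : pvP c l i ≤ pvP c l j := by
  unfold pvP
  exact List.Sublist.countP_le (List.take_sublist_take_left h)

lemma pvP_succ (c : String) (l : List Char) {i : Nat} (h : i < l.length) :
    pvP c l (i+1) = pvP c l i + (if c.toList = [l.getD i ' '] then 0 else 1) := by
  unfold pvP
  rw [List.take_add_one, List.countP_append]
  have : l[i]? = some (l.getD i ' ') := by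
    rw [List.getD_eq_getElem _ _ h, List.getElem?_eq_getElem h]
  rw [this]
  by_cases hc : c.toList = [l.getD i ' '] <;> simp [hc, List.countP_cons]

def pvCan (l : List Char) (c : String) (m : Int) (L : Nat) : Bool :=
  (List.range (l.length + 1)).any
    (fun i => decide (i + L ≤ l.length) && decide ((pvP c l (i + L) : Int) - (pvP c l i : Int) ≤ m))

lemma pvCan_iff (l : List Char) (c : String) (m : Int) (L : Nat) :
    pvCan l c m L = true ↔ ∃ i, i + L ≤ l.length ∧ (pvP c l (i + L) : Int) - (pvP c l i : Int) ≤ m := by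
  unfold pvCan
  simp only [List.any_eq_true, List.mem_range, decide_eq_true_eq, Bool.and_eq_true]
  constructor
  · rintro ⟨i, _, h1, h2⟩; exact ⟨i, h1, h2⟩
  · rintro ⟨i, h1, h2⟩; exact ⟨i, by omega, h1, h2⟩

def pvG (l : List Char) (c : String) (m : Int) : Nat :=
  Nat.findGreatest (fun L => pvCan l c m L = true) l.length

lemma pvCan_of_le (l : List Char) (c : String) (m : Int) {K J : Nat} (hJK : J ≤ K)
    (h : pvCan l c m K = true) : pvCan l c m J = true := by
  rw [pvCan_iff] at h ⊢
  obtain ⟨i, h1, h2⟩ := h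
  refine ⟨i, by omega, ?_⟩
  have := pvP_mono c l (show i + J ≤ i + K by omega)
  omega

lemma pvG_le (l : List Char) (c : String) (m : Int) : pvG l c m ≤ l.length :=
  Nat.findGreatest_le _

lemma pvCan_iff_le_G (l : List Char) (c : String) (m : Int) (hm : 0 ≤ m) {K : Nat}
    (hK : K ≤ l.length) : pvCan l c m K = true ↔ K ≤ pvG l c m := by
  constructor
  · intro h; exact Nat.le_findGreatest hK h
  · intro h
    rcases Nat.eq_zero_or_pos (pvG l c m) with h0 | h0
    · have : K = 0 := by omega
      subst this
      rw [pvCan_iff]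
      exact ⟨0, by omega, by simpa [pvP] using hm⟩
    · have h00 : pvCan l c m 0 = true := by
        rw [pvCan_iff]; exact ⟨0, by omega, by simpa [pvP] using hm⟩
      have hspec : pvCan l c m (pvG l c m) = true :=
        Nat.findGreatest_spec (P := fun L => pvCan l c m L = true) (Nat.zero_le _) h00
      exact pvCan_of_le l c m h hspec

lemma pvP_window (c : String) (l : List Char) (i L : Nat) :
    pvP c l (i + L) = pvP c l i + ((l.drop i).take L).countP (fun ch => !decide (c.toList = [ch])) := by
  unfold pvP
  rw [List.take_add, List.countP_append]

lemma pvCan_iff_infix (l : List Char) (c : String) (m : Int) (L : Nat) :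
    pvCan l c m L = true ↔
      ∃ t, t <:+: l ∧ t.length = L ∧ ((t.countP (fun ch => !decide (c.toList = [ch])) : Int) ≤ m) := by
  rw [pvCan_iff]
  constructor
  · rintro ⟨i, h1, h2⟩
    refine ⟨(l.drop i).take L, ?_, ?_, ?_⟩
    · exact ((l.drop i).take_prefix L).isInfix.trans (l.drop_suffix i).isInfix
    · simp; omega
    · rw [pvP_window c l i L] at h2; omega
  · rintro ⟨t, ⟨pre, suf, rfl⟩, hlen, hcnt⟩
    refine ⟨pre.length, by simp; omega, ?_⟩
    have h1 : (pre ++ t ++ suf).take pre.length = pre := by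
      rw [List.append_assoc]; exact List.take_left
    have h2 : (pre ++ t ++ suf).take (pre.length + L) = pre ++ t := by
      rw [List.append_assoc, List.take_append]
      simp [List.take_left' hlen]
    unfold pvP
    rw [h1, h2, List.countP_append]
    omega

lemma pvCan_reverse (l : List Char) (c : String) (m : Int) (L : Nat) :
    pvCan l.reverse c m L = pvCan l c m L := by
  have h : ∀ (l₁ l₂ : List Char), pvCan l₁ c m L = true → l₂ = l₁.reverse → pvCan l₂ c m L = true := by
    rintro l₁ l₂ h rfl
    rw [pvCan_iff_infix] at h ⊢
    obtain ⟨t, hinf, hlen, hcnt⟩ := h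
    exact ⟨t.reverse, List.reverse_infix.mpr (by simpa using hinf), by simpa using hlen,
      by simpa [List.countP_reverse] using hcnt⟩
  by_cases h1 : pvCan l c m L = true
  · rw [h1, h l l.reverse h1 rfl]
  · rcases h2 : pvCan l.reverse c m L
    · simp [h1]
    · exact absurd (by simpa using h l.reverse l h2 (by simp)) h1

lemma pvG_reverse (l : List Char) (c : String) (m : Int) : pvG l.reverse c m = pvG l c m := by
  unfold pvG
  simp [pvCan_reverse]

lemma pvAWhile_spec (l : List Char) (c : String) (m : Int) (hm : 0 ≤ m) (r : Nat) (hr : r ≤ l.length) :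
    ∀ (fuel left : Nat),
      left ≤ r →
      (∀ j < left, (pvP c l r : Int) - pvP c l j > m) →
      r - left < fuel →
      ∃ left', pvAWhile l c m fuel left ((pvP c l r : Int) - pvP c l left) =
          (left', (pvP c l r : Int) - pvP c l left') ∧
        left ≤ left' ∧ left' ≤ r ∧ (pvP c l r : Int) - pvP c l left' ≤ m ∧
        (∀ j < left', (pvP c l r : Int) - pvP c l j > m) := by
  intro fuel
  induction fuel with
  | zero => intro left _ _ hf; omega
  | succ f ih =>
    intro left hlr hmin hf
    by_cases hgt : (pvP c l r : Int) - pvP c l left > m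
    · have hlt : left < r := by
        rcases Nat.lt_or_ge left r with h | h
        · exact h
        · exfalso; have : left = r := by omega
          subst this; omega
      have hget : l[left]? = some (l.getD left ' ') := by
        rw [List.getD_eq_getElem _ _ (by omega), List.getElem?_eq_getElem (by omega)]
      have hstep : (if c.toList = [l.getD left ' '] then (pvP c l r : Int) - pvP c l left
            else (pvP c l r : Int) - pvP c l left - 1) = (pvP c l r : Int) - pvP c l (left + 1) := by
        have hb := pvP_succ c l (show left < l.length by omega)
        by_cases hc : c.toList = [l.getD left ' ']
        · rw [if_pos hc] at hb ⊢; omega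
        · rw [if_neg hc] at hb ⊢; omega
      have hrec : pvAWhile l c m (f+1) left ((pvP c l r : Int) - pvP c l left) =
          pvAWhile l c m f (left + 1) ((pvP c l r : Int) - pvP c l (left + 1)) := by
        show (if (pvP c l r : Int) - pvP c l left > m then _ else _) = _
        rw [if_pos hgt, hget]
        simp only []
        rw [hstep]
      rw [hrec]
      refine (ih (left + 1) (by omega) ?_ (by omega)).imp ?_
      · intro j hj
        rcases Nat.lt_or_ge j left with h | h
        · exact hmin j h
        · have : j = left := by omega
          subst this; exact hgt
      · rintro left' ⟨h1, h2, h3, h4, h5⟩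
        exact ⟨h1, by omega, h3, h4, h5⟩
    · refine ⟨left, ?_, le_refl _, hlr, by omega, hmin⟩
      show (if (pvP c l r : Int) - pvP c l left > m then _ else _) = _
      rw [if_neg hgt]

lemma pvASlide_inv (l : List Char) (c : String) (m : Int) (hm : 0 ≤ m) :
    ∀ k, k ≤ l.length →
    ∃ mx left,
      ((List.range k).foldl (fun st right =>
          let changes := if c.toList = [l.getD right ' '] then st.2.2 else st.2.2 + 1
          let w := pvAWhile l c m (l.length + 1) st.2.1 changes
          (max st.1 ((right : Int) - (w.1 : Int) + 1), w.1, w.2))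
        ((0 : Int), (0 : Nat), (0 : Int))) = (mx, left, (pvP c l k : Int) - pvP c l left) ∧
      left ≤ k ∧
      (∀ j < left, (pvP c l k : Int) - pvP c l j > m) ∧
      (pvP c l k : Int) - pvP c l left ≤ m ∧
      0 ≤ mx ∧ mx ≤ (pvG l c m : Int) ∧
      (∀ i L : Nat, i + L ≤ k → (pvP c l (i + L) : Int) - pvP c l i ≤ m → (L : Int) ≤ mx) := by
  intro k
  induction k with
  | zero =>
    intro _
    refine ⟨0, 0, by simp [pvP], by omega, by omega, by simp [pvP]; omega, by omega, by positivity, ?_⟩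
    intro i L h _
    have : L = 0 := by omega
    simp [this]
  | succ k ih =>
    intro hk1
    obtain ⟨mx, left, heq, hlk, hminv, hchm, hmx0, hmxG, hI6⟩ := ih (by omega)
    rw [List.range_succ, List.foldl_append, List.foldl_cons, List.foldl_nil, heq]
    have hkn : k < l.length := by omega
    have hch : (if c.toList = [l.getD k ' '] then (pvP c l k : Int) - pvP c l left
        else (pvP c l k : Int) - pvP c l left + 1) = (pvP c l (k+1) : Int) - pvP c l left := by
      have hb := pvP_succ c l hkn
      by_cases hc : c.toList = [l.getD k ' ']
      · rw [if_pos hc] at hb ⊢; omega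
      · rw [if_neg hc] at hb ⊢; omega
    have hmin1 : ∀ j < left, (pvP c l (k+1) : Int) - pvP c l j > m := by
      intro j hj
      have := pvP_mono c l (show k ≤ k+1 by omega)
      have := hminv j hj
      omega
    obtain ⟨left', hweq, hll', hl'r, hl'm, hmin'⟩ :=
      pvAWhile_spec l c m hm (k+1) (by omega) (l.length + 1) left (by omega) hmin1 (by omega)
    have hcanw : pvCan l c m (k + 1 - left') = true := by
      rw [pvCan_iff]
      exact ⟨left', by omega, by rw [show left' + (k + 1 - left') = k + 1 by omega]; exact hl'm⟩
    have hwin : ((k + 1 - left' : Nat) : Int) ≤ (pvG l c m : Int) := by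
      exact_mod_cast (pvCan_iff_le_G l c m hm (by omega)).mp hcanw
    refine ⟨max mx ((k : Int) - (left' : Int) + 1), left', ?_, by omega, hmin', hl'm, ?_, ?_, ?_⟩
    · simp only [hch, hweq]
    · omega
    · have : ((k + 1 - left' : Nat) : Int) = (k : Int) - left' + 1 := by omega
      rw [sup_le_iff]
      constructor
      · exact hmxG
      · omega
    · intro i L hiL hfeas
      rcases Nat.lt_or_ge (i + L) (k + 1) with h | h
      · have := hI6 i L (by omega) hfeas
        omega
      · have hie : i + L = k + 1 := by omega
        have hil' : left' ≤ i := by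
          by_contra hcon
          have := hmin' i (by omega)
          rw [hie] at hfeas
          omega
        have : (L : Int) ≤ (k : Int) - left' + 1 := by omega
        omega

lemma pvASlide_eq (l : List Char) (c : String) (m : Int) (hm : 0 ≤ m) :
    pvASlide l c m = (pvG l c m : Int) := by
  obtain ⟨mx, left, heq, _, _, _, hmx0, hmxG, hI6⟩ := pvASlide_inv l c m hm l.length (le_refl _)
  have h1 : pvASlide l c m = mx := by
    unfold pvASlide
    rw [heq]
  rcases Nat.eq_zero_or_pos (pvG l c m) with h0 | h0
  · rw [h1, h0]; omega
  · have hcanG : pvCan l c m (pvG l c m) = true :=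
      (pvCan_iff_le_G l c m hm (pvG_le l c m)).mpr (le_refl _)
    rw [pvCan_iff] at hcanG
    obtain ⟨i, hi1, hi2⟩ := hcanG
    have := hI6 i (pvG l c m) hi1 hi2
    rw [h1]
    omega

lemma pvBPre_getD (c : String) : ∀ (l : List Char) (cur : Int) (j : Nat), j < l.length →
    (pvBPre c l cur).getD j 0 = cur + (pvP c l (j+1) : Int) := by
  intro l
  induction l with
  | nil => intro cur j h; simp at h
  | cons ch t ih =>
    intro cur j h
    match j with
    | 0 =>
      have hv : pvP c (ch :: t) 1 = if c.toList = [ch] then 0 else 1 := by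
        unfold pvP
        by_cases hc : c.toList = [ch] <;> simp [hc]
      simp only [pvBPre, List.getD_cons_zero, hv]
      by_cases hc : c.toList = [ch] <;> simp [hc]
    | j + 1 =>
      have hstep : pvP c (ch :: t) (j + 2) = (if c.toList = [ch] then 0 else 1) + pvP c t (j + 1) := by
        unfold pvP
        show List.countP _ (ch :: t.take (j+1)) = _
        by_cases hc : c.toList = [ch] <;> simp [hc] <;> omega
      have hrec : (pvBPre c (ch :: t) cur).getD (j+1) 0 =
          (pvBPre c t (cur + if c.toList = [ch] then 0 else 1)).getD j 0 := by
        simp [pvBPre]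
      rw [hrec, ih _ j (by simpa using h), hstep]
      by_cases hc : c.toList = [ch] <;> simp [hc] <;> ring

lemma pvPre_getD (c : String) (l : List Char) (j : Nat) (h : j ≤ l.length) :
    (0 :: pvBPre c l 0).getD j 0 = (pvP c l j : Int) := by
  match j with
  | 0 => simp [pvP]
  | j + 1 =>
    show (pvBPre c l 0).getD j 0 = _
    rw [pvBPre_getD c l 0 j (by omega)]
    omega

lemma pvBCan_iff (l : List Char) (c : String) (m : Int) (L : Int) (h0 : 0 ≤ L) (hL : L ≤ (l.length : Int)) :
    pvBCan (0 :: pvBPre c l 0) l.length m L = true ↔ pvCan l c m L.toNat = true := by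
  unfold pvBCan
  rw [List.any_eq_true, pvCan_iff]
  constructor
  · rintro ⟨x, hx, hp⟩
    rw [PySem.List.mem_pyRange_one] at hx
    refine ⟨x.toNat, by omega, ?_⟩
    rw [pvPre_getD c l (x + L).toNat (by omega), pvPre_getD c l x.toNat (by omega)] at hp
    have hxl : (x + L).toNat = x.toNat + L.toNat := by omega
    rw [hxl] at hp
    simpa using hp
  · rintro ⟨i, hi, hp⟩
    refine ⟨(i : Int), PySem.List.mem_pyRange_one.mpr ⟨by omega, by omega⟩, ?_⟩
    rw [pvPre_getD c l ((i : Int) + L).toNat (by omega), pvPre_getD c l (i : Int).toNat (by omega)]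
    have hxl : ((i : Int) + L).toNat = i + L.toNat := by omega
    rw [hxl]
    simpa using hp

lemma pvBSearch_spec (l : List Char) (c : String) (m : Int) (hm : 0 ≤ m) :
    ∀ (fuel : Nat) (lo hi ans : Int),
      0 ≤ lo → lo ≤ (pvG l c m : Int) + 1 → (pvG l c m : Int) ≤ hi → hi ≤ (l.length : Int) →
      hi - lo + 2 ≤ (fuel : Int) →
      (ans = lo - 1 ∨ (ans = 0 ∧ lo = 0)) →
      pvBSearch (0 :: pvBPre c l 0) l.length m fuel lo hi ans = (pvG l c m : Int) := by
  intro fuel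
  induction fuel with
  | zero => intro lo hi ans _ _ _ _ hf _; exfalso; omega
  | succ f ih =>
    intro lo hi ans hlo0 hloG hGhi hhin hf hans
    show (if lo ≤ hi then _ else _) = _
    by_cases hlh : lo ≤ hi
    · rw [if_pos hlh]
      obtain ⟨hmid1, hmid2⟩ := PySem.Int.floordiv_two_mid_bounds hlh
      set mid := PySem.Int.floordiv (lo + hi) 2 with hmid
      have hcan := pvBCan_iff l c m mid (by omega) (by omega)
      by_cases hc : pvBCan (0 :: pvBPre c l 0) l.length m mid = true
      · rw [if_pos hc]
        have : mid.toNat ≤ pvG l c m := by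
          rw [← pvCan_iff_le_G l c m hm (by omega)]
          exact hcan.mp hc
        exact ih (mid + 1) hi mid (by omega) (by omega) hGhi hhin (by omega) (by omega)
      · rw [if_neg hc]
        have : ¬ mid.toNat ≤ pvG l c m := by
          rw [← pvCan_iff_le_G l c m hm (by omega)]
          intro hh
          exact hc (hcan.mpr hh)
        exact ih lo (mid - 1) ans hlo0 hloG (by omega) (by omega) (by omega) hans
    · rw [if_neg hlh]
      have hG0 : (0 : Int) ≤ (pvG l c m : Int) := by positivity
      rcases hans with h | ⟨h1, h2⟩
      · omega
      · exfalso; omega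

lemma pv_alt_eq (s : String) (c : String) (m : Int) (hm : 0 ≤ m) :
    compute_max_koyomity_alt s c m = (pvG s.toList c m : Int) := by
  unfold compute_max_koyomity_alt
  exact pvBSearch_spec s.toList c m hm (s.toList.length + 2) 0 (s.toList.length : Int) 0
    (by omega) (by positivity) (by exact_mod_cast pvG_le s.toList c m) (by omega)
    (by push_cast; omega) (by omega)

lemma pvCountGo_single (d : Char) : ∀ (l : List Char) (fuel acc : Nat), l.length ≤ fuel →
    PySem.Chars.count.go [d] fuel l acc = acc + l.count d := by
  intro l
  induction l with
  | nil =>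
    intro fuel acc _
    match fuel with
    | 0 => rfl
    | f + 1 => rfl
  | cons ch t ih =>
    intro fuel acc hf
    match fuel with
    | 0 => simp at hf
    | f + 1 =>
      have hpre : List.isPrefixOf [d] (ch :: t) = (d == ch) := by
        simp [List.isPrefixOf]
      show (if List.isPrefixOf [d] (ch :: t) then
              PySem.Chars.count.go [d] f (List.drop (List.length [d]) (ch :: t)) (acc + 1)
            else PySem.Chars.count.go [d] f t acc) = acc + (ch :: t).count d
      rw [hpre]
      by_cases hc : d = ch
      · rw [if_pos (by simp [hc])]
        simp only [List.length_singleton, List.drop_succ_cons, List.drop_zero]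
        rw [ih f (acc+1) (by simpa using hf)]
        simp [hc.symm]
        omega
      · rw [if_neg (by simp [hc])]
        rw [ih f acc (by simpa using hf)]
        have : (ch == d) = false := by simp; intro h; exact hc h.symm
        simp [List.count_cons, this]
lemma pvCount_single (l : List Char) (cl : List Char) (d : Char) (h : cl = [d]) :
    PySem.Chars.count l cl = l.count d := by
  subst h
  show (if ([d] : List Char).isEmpty then l.length + 1 else PySem.Chars.count.go [d] l.length l 0) = _
  rw [if_neg (by simp)]
  rw [pvCountGo_single d l l.length 0 (le_refl _)]
  omega

lemma pvP_top_single (c : String) (l : List Char) (d : Char) (h : c.toList = [d]) :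
    pvP c l l.length + l.count d = l.length := by
  unfold pvP
  rw [List.take_length, h]
  have : l.count d = l.countP (fun ch => decide (([d] : List Char) = [ch])) := by
    rw [List.count_eq_countP]
    apply List.countP_congr
    intro ch _
    constructor
    · intro hh
      have : ch = d := by simpa using hh
      subst this; simp
    · intro hh
      have h2 : [d] = [ch] := by simpa using hh
      have : d = ch := by simpa using h2
      subst this; simp
  rw [this]
  have hlen := List.length_eq_countP_add_countP (l := l) (p := fun ch => decide (([d] : List Char) = [ch]))
  have hcg : l.countP (fun a => decide (¬ decide (([d] : List Char) = [a]) = true)) =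
      l.countP (fun ch => !decide (([d] : List Char) = [ch])) := by
    apply List.countP_congr
    intro ch _
    simp
  omega

lemma pvP_top_all (c : String) (l : List Char) (h : c.toList.length ≠ 1) :
    pvP c l l.length = l.length := by
  unfold pvP
  rw [List.take_length]
  rw [List.countP_eq_length]
  intro ch _hch
  have : ¬ (c.toList = [ch]) := by
    intro hc
    rw [hc] at h
    simp at h
  simp [this]

lemma pvP_le (c : String) (l : List Char) (j : Nat) : pvP c l j ≤ j := by
  unfold pvP
  calc (l.take j).countP _ ≤ (l.take j).length := List.countP_le_length
    _ ≤ j := List.length_take_le j l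

lemma pvG_top (s c : String) (m : Int) (hm : 0 ≤ m)
    (hsc : (s.toList.length : Int) - (PySem.Str.count s c : Int) ≤ m)
    (hside : c.toList.length = 1 ∨ (s.toList.length : Int) ≤ m) :
    pvG s.toList c m = s.toList.length := by
  have hcan : pvCan s.toList c m s.toList.length = true := by
    rw [pvCan_iff]
    refine ⟨0, by omega, ?_⟩
    have hp0 : pvP c s.toList 0 = 0 := by simp [pvP]
    rw [hp0, Nat.zero_add]
    rcases hside with h1 | h1
    · obtain ⟨d, hd⟩ := List.length_eq_one_iff.mp h1
      have hcnt : PySem.Str.count s c = s.toList.count d := by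
        have := pvCount_single s.toList c.toList d hd
        simpa using this
      have := pvP_top_single c s.toList d hd
      omega
    · have := pvP_le c s.toList s.toList.length
      omega
  exact le_antisymm (pvG_le _ _ _) ((pvCan_iff_le_G s.toList c m hm (le_refl _)).mp hcan)

-- ===== VERDICT (by name: the statement is the Claim_ definition above) =====
theorem compute_max_koyomity_spec : Claim_unchanged_compute_max_koyomity := by
  unfold Claim_unchanged_compute_max_koyomity
  intro s c m _ hpre
  unfold Spec_compute_max_koyomity
  intro hnd
  by_cases hm : 0 ≤ m
  · unfold compute_max_koyomity
    rw [pv_alt_eq s c m hm]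
    by_cases hif : (s.toList.length : Int) - (PySem.Str.count s c : Int) ≤ m
    · rw [if_pos hif]
      have hside : c.toList.length = 1 ∨ (s.toList.length : Int) ≤ m := by
        by_cases h1 : c.toList.length = 1
        · exact Or.inl h1
        · right
          unfold D_compute_max_koyomity at hnd
          push Not at hnd
          have hcl : PySem.Str.len c = c.toList.length := by simp
          have hsl : PySem.Str.len s = s.toList.length := by simp
          have := hnd (by rw [hcl]; exact_mod_cast h1) hm (by rw [hsl]; omega)
          rw [hsl] at this
          exact this
      rw [pvG_top s c m hm hif hside]
    · rw [if_neg hif]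
      rw [pvASlide_eq _ _ _ hm, pvASlide_eq _ _ _ hm, pvG_reverse]
      simp
  · have hs : s = "" := by
      rcases hpre with h | h
      · exact absurd h hm
      · exact h
    subst hs
    have h0 : ("" : String).toList = [] := rfl
    have hA : compute_max_koyomity "" c m = 0 := by
      unfold compute_max_koyomity
      rw [h0]
      split
      · simp
      · simp [pvASlide]
    have hB : compute_max_koyomity_alt "" c m = 0 := by
      unfold compute_max_koyomity_alt
      rw [h0]
      show pvBSearch [0] 0 m 2 0 0 0 = 0
      have hmid : PySem.Int.floordiv (0 + 0) 2 = 0 := by decide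
      have hcan : pvBCan [0] 0 m 0 = false := by
        unfold pvBCan
        have h1 : ((0:Nat):Int) - 0 + 1 = 1 := by norm_num
        rw [h1]
        have h2 : PySem.List.pyRange 0 1 1 = [0] := by decide
        rw [h2]
        simp only [List.any_cons, List.any_nil, Bool.or_false]
        simp [hm]
      show (if (0:Int) ≤ 0 then
              (if pvBCan [0] 0 m (PySem.Int.floordiv (0 + 0) 2) = true then
                 pvBSearch [0] 0 m 1 (PySem.Int.floordiv (0 + 0) 2 + 1) 0 (PySem.Int.floordiv (0 + 0) 2)
               else pvBSearch [0] 0 m 1 0 (PySem.Int.floordiv (0 + 0) 2 - 1) 0)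
            else 0) = 0
      rw [if_pos (by omega), hmid, hcan]
      norm_num [pvBSearch]
    rw [hA, hB]

theorem compute_max_koyomity_tight : Claim_exact_compute_max_koyomity := by
  unfold Claim_exact_compute_max_koyomity
  intro s c m _ _ hD
  obtain ⟨hc1, hm, hsc, hmn⟩ := hD
  have hcl : PySem.Str.len c = c.toList.length := by simp
  have hsl : PySem.Str.len s = s.toList.length := by simp
  rw [hsl] at hsc hmn
  rw [hcl] at hc1
  have hc1' : c.toList.length ≠ 1 := by exact_mod_cast hc1
  have hA : compute_max_koyomity s c m = (s.toList.length : Int) := by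
    unfold compute_max_koyomity
    rw [if_pos (by omega)]
  have hB : compute_max_koyomity_alt s c m = (pvG s.toList c m : Int) := pv_alt_eq s c m hm
  rw [hA, hB]
  intro hcon
  have hGn : pvG s.toList c m = s.toList.length := by omega
  have hcan : pvCan s.toList c m s.toList.length = true := by
    rw [pvCan_iff_le_G s.toList c m hm (le_refl _), hGn]
  rw [pvCan_iff] at hcan
  obtain ⟨i, hi1, hi2⟩ := hcan
  have hi0 : i = 0 := by omega
  subst hi0
  rw [Nat.zero_add] at hi2
  have hp0 : pvP c s.toList 0 = 0 := by simp [pvP]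
  have htop := pvP_top_all c s.toList hc1'
  omega

theorem compute_max_koyomity_changed : Claim_changed_compute_max_koyomity := by
  unfold Claim_changed_compute_max_koyomity; decide
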